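-- pv_equiv track=rewrite | github.com/keeertu/reglens | backend/main.py | compress_changes
-- ===== SOURCE A (Python) =====
-- MAX_CHANGES_FOR_LLM = 10
--
-- MAX_TEXT_LEN = 300
--
-- def compress_changes(changes):
--     grouped = {}
--     for anchor, line in changes:
--         grouped.setdefault(anchor, []).append(line)
--
--     records = []
--
--     for anchor, lines in grouped.items():
--         plus = [l[1:].strip() for l in lines if l.startswith("+")]
--         minus = [l[1:].strip() for l in lines if l.startswith("-")]
--
--         if plus and minus:
--             records.append({
--                 "section": anchor,
--                 "type": "MODIFIED",
--                 "before": minus[0][:MAX_TEXT_LEN],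
--                 "after": plus[0][:MAX_TEXT_LEN],
--             })
--         elif plus:
--             records.append({
--                 "section": anchor,
--                 "type": "ADDED",
--                 "text": plus[0][:MAX_TEXT_LEN],
--             })
--         elif minus:
--             records.append({
--                 "section": anchor,
--                 "type": "REMOVED",
--                 "text": minus[0][:MAX_TEXT_LEN],
--             })
--
--     return records[:MAX_CHANGES_FOR_LLM]
-- ===== SOURCE B (Python) =====
-- MAX_CHANGES_FOR_LLM = 10
--
-- MAX_TEXT_LEN = 300
--
-- def compress_changes(changes):
--     # Single pass: per anchor keep only the FIRST '+' line and FIRST '-' line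
--     # (already stripped), instead of storing full per-anchor line lists and
--     # rescanning them with two comprehensions.
--     state = {}
--     for anchor, line in changes:
--         plus, minus = state.get(anchor, (None, None))
--         if line.startswith("+"):
--             if plus is None:
--                 plus = line[1:].strip()
--         elif line.startswith("-"):
--             if minus is None:
--                 minus = line[1:].strip()
--         state[anchor] = (plus, minus)
--
--     records = []
--     for anchor, (plus, minus) in state.items():
--         if plus is not None and minus is not None:
--             records.append({
--                 "section": anchor,
--                 "type": "MODIFIED",
--                 "before": minus[:MAX_TEXT_LEN],
--                 "after": plus[:MAX_TEXT_LEN],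
--             })
--         elif plus is not None:
--             records.append({
--                 "section": anchor,
--                 "type": "ADDED",
--                 "text": plus[:MAX_TEXT_LEN],
--             })
--         elif minus is not None:
--             records.append({
--                 "section": anchor,
--                 "type": "REMOVED",
--                 "text": minus[:MAX_TEXT_LEN],
--             })
--     return records[:MAX_CHANGES_FOR_LLM]
-- ===== Notes on version B (the rewrite author's own statement) =====
-- stated objective: alternative
-- what changed: B replaces A's group-all-lines-then-rescan (dict of full per-anchor line lists, re-filtered by two comprehensions) with a single pass that keeps only the first '+' and first '-' stripped line per anchor, deciding the record type from that pair.
import Mathlib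
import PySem

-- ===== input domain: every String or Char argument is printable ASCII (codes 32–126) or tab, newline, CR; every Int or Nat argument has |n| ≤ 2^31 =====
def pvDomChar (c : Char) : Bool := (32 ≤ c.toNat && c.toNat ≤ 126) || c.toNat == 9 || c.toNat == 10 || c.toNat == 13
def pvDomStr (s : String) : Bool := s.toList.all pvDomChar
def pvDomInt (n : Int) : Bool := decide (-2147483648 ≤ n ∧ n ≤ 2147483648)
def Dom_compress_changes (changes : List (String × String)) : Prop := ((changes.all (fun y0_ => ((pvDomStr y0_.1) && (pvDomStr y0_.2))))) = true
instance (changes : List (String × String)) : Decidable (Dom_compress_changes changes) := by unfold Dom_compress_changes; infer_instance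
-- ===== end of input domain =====

-- B keeps only the first '+'/'-' stripped line per anchor in one pass, instead of
-- grouping full per-anchor line lists and rescanning them with two comprehensions.

-- shared helper: l[1:].strip()
def pvProc (l : String) : String := PySem.Str.strip (PySem.Str.slice l (some 1) none)
-- shared helper: s[:MAX_TEXT_LEN]
def pvTrunc (s : String) : String := PySem.Str.slice s none (some 300)

-- ===== PORT A =====
-- grouped.setdefault(anchor, []).append(line)  ==  grouped[anchor] = grouped.get(anchor, []) + [line]
def pvGroupStep (d : PySem.Dict String (List String)) (p : String × String) :
    PySem.Dict String (List String) :=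
  d.modify p.1 [] (fun ls => ls ++ [p.2])

-- one iteration of A's second loop over grouped.items()
def pvEmitA (recs : List (List (String × String))) (p : String × List String) :
    List (List (String × String)) :=
  let plus := (p.2.filter (fun l => PySem.Str.startswith l "+")).map pvProc
  let minus := (p.2.filter (fun l => PySem.Str.startswith l "-")).map pvProc
  if !plus.isEmpty && !minus.isEmpty then
    recs ++ [[("section", p.1), ("type", "MODIFIED"),
              ("before", pvTrunc (PySem.List.pyGetD minus 0 "")),
              ("after", pvTrunc (PySem.List.pyGetD plus 0 ""))]]
  else if !plus.isEmpty then
    recs ++ [[("section", p.1), ("type", "ADDED"), ("text", pvTrunc (PySem.List.pyGetD plus 0 ""))]]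
  else if !minus.isEmpty then
    recs ++ [[("section", p.1), ("type", "REMOVED"), ("text", pvTrunc (PySem.List.pyGetD minus 0 ""))]]
  else recs

def compress_changes (changes : List (String × String)) : List (List (String × String)) :=
  PySem.List.slice ((changes.foldl pvGroupStep PySem.Dict.empty).items.foldl pvEmitA [])
    none (some 10)

-- ===== PORT B =====
-- one change updates the (first '+', first '-') pair of its anchor
def pvPairStep (pm : Option String × Option String) (line : String) :
    Option String × Option String :=
  if PySem.Str.startswith line "+" then
    (if pm.1.isNone then (some (pvProc line), pm.2) else pm)
  else if PySem.Str.startswith line "-" then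
    (if pm.2.isNone then (pm.1, some (pvProc line)) else pm)
  else pm

def pvFirstStep (d : PySem.Dict String (Option String × Option String)) (p : String × String) :
    PySem.Dict String (Option String × Option String) :=
  d.insert p.1 (pvPairStep (d.getD p.1 (none, none)) p.2)

-- one iteration of B's second loop over state.items()
def pvEmitB (recs : List (List (String × String))) (q : String × (Option String × Option String)) :
    List (List (String × String)) :=
  match q.2 with
  | (some pl, some mi) =>
      recs ++ [[("section", q.1), ("type", "MODIFIED"),
                ("before", pvTrunc mi), ("after", pvTrunc pl)]]
  | (some pl, none) => recs ++ [[("section", q.1), ("type", "ADDED"), ("text", pvTrunc pl)]]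
  | (none, some mi) => recs ++ [[("section", q.1), ("type", "REMOVED"), ("text", pvTrunc mi)]]
  | (none, none) => recs

def compress_changes_alt (changes : List (String × String)) : List (List (String × String)) :=
  PySem.List.slice ((changes.foldl pvFirstStep PySem.Dict.empty).items.foldl pvEmitB [])
    none (some 10)

-- ===== PRECONDITION & SPEC =====
def Spec_compress_changes (changes : List (String × String)) (out : List (List (String × String))) : Prop := out = compress_changes_alt changes
instance (changes : List (String × String)) (out : List (List (String × String))) : Decidable (Spec_compress_changes changes out) := by unfold Spec_compress_changes; infer_instance

-- ===== CLAIM (what is proved, stated in full; the proofs are below) =====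
def Claim_equal_compress_changes : Prop := ∀ (changes : List (String × String)), Dom_compress_changes changes → Spec_compress_changes changes (compress_changes changes)

-- ===== LEMMAS AND PROOFS =====

-- abstraction: the (first '+', first '-') pair of a line list, both stripped
def pvG (ls : List String) : Option String × Option String :=
  (((ls.filter (fun l => PySem.Str.startswith l "+")).map pvProc).head?,
   ((ls.filter (fun l => PySem.Str.startswith l "-")).map pvProc).head?)

def pvF (p : String × List String) : String × (Option String × Option String) := (p.1, pvG p.2)

theorem pv_not_both (l : List Char)
    (h1 : PySem.Chars.startswith l ['+'] = true) (h2 : PySem.Chars.startswith l ['-'] = true) : False := by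
  rw [PySem.Chars.startswith_iff] at h1 h2
  obtain ⟨t1, e1⟩ := h1
  obtain ⟨t2, e2⟩ := h2
  rw [← e1] at e2
  simp at e2

theorem pvPairStep_g (ls : List String) (line : String) :
    pvPairStep (pvG ls) line = pvG (ls ++ [line]) := by
  unfold pvPairStep pvG
  simp only [PySem.Str.startswith_eq, show ("+" : String).toList = ['+'] from rfl,
    show ("-" : String).toList = ['-'] from rfl]
  by_cases h1 : PySem.Chars.startswith line.toList ['+'] = true
  · have h2 : PySem.Chars.startswith line.toList ['-'] = false := by
      by_contra h
      exact pv_not_both line.toList h1 (by revert h; cases PySem.Chars.startswith line.toList ['-'] <;> simp)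
    simp only [h1, h2, List.filter_append]
    cases hp : List.find? (fun l => PySem.Chars.startswith l.toList ['+']) ls <;>
      simp [hp, h1, h2]
  · have h1' : PySem.Chars.startswith line.toList ['+'] = false := by
      revert h1; cases PySem.Chars.startswith line.toList ['+'] <;> simp
    by_cases h2 : PySem.Chars.startswith line.toList ['-'] = true
    · simp only [h1', h2, List.filter_append]
      cases hm : List.find? (fun l => PySem.Chars.startswith l.toList ['-']) ls <;>
        simp [hm, h1', h2]
    · have h2' : PySem.Chars.startswith line.toList ['-'] = false := by
        revert h2; cases PySem.Chars.startswith line.toList ['-'] <;> simp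
      simp [h1', h2', List.filter_append]

theorem pv_keys_eq (dA : PySem.Dict String (List String))
    (dB : PySem.Dict String (Option String × Option String))
    (h : dB.items = dA.items.map pvF) : dB.keys = dA.keys := by
  simp only [PySem.Dict.keys, h, List.map_map]
  rfl

theorem pv_step_inv (dA : PySem.Dict String (List String))
    (dB : PySem.Dict String (Option String × Option String))
    (p : String × String)
    (hnd : dA.keys.Nodup) (h : dB.items = dA.items.map pvF) :
    (pvFirstStep dB p).items = (pvGroupStep dA p).items.map pvF := by
  have hkeys := pv_keys_eq dA dB h
  have hcont : dB.contains p.1 = dA.contains p.1 := by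
    rw [PySem.Dict.contains_eq_decide_mem_keys, PySem.Dict.contains_eq_decide_mem_keys, hkeys]
  unfold pvFirstStep pvGroupStep
  simp only [PySem.Dict.modify]
  by_cases hc : dA.contains p.1 = true
  · have hndB : dB.keys.Nodup := by rw [hkeys]; exact hnd
    rw [PySem.Dict.items_insert_of_contains _ _ (by rw [hcont]; exact hc),
        PySem.Dict.items_insert_of_contains _ _ hc, h, List.map_map, List.map_map]
    apply List.map_congr_left
    intro q hq
    by_cases hk : (q.1 == p.1) = true
    · have hkq : q.1 = p.1 := by exact eq_of_beq hk
      have hgA : dA.getD p.1 [] = q.2 := by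
        apply PySem.Dict.getD_of_mem_items _ _ hnd
        rw [← hkq]; exact hq
      have hgB : dB.getD p.1 (none, none) = pvG q.2 := by
        apply PySem.Dict.getD_of_mem_items _ _ hndB
        rw [h]
        rw [← hkq]
        exact List.mem_map_of_mem hq
      simp only [Function.comp, pvF, hk, if_pos, hgA, hgB]
      simp [pvPairStep_g]
    · simp only [Function.comp, pvF, hk]
      simp at hk
      simp
  · have hc' : dA.contains p.1 = false := by revert hc; cases dA.contains p.1 <;> simp
    rw [PySem.Dict.items_insert_of_not_contains _ _ (by rw [hcont]; exact hc'),
        PySem.Dict.items_insert_of_not_contains _ _ hc', h, List.map_append]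
    have hA : dA.getD p.1 [] = [] := PySem.Dict.getD_of_not_contains dA _ hc'
    have hB : dB.getD p.1 (none, none) = (none, none) :=
      PySem.Dict.getD_of_not_contains dB _ (by rw [hcont]; exact hc')
    have : pvPairStep (dB.getD p.1 (none, none)) p.2 = pvG [p.2] := by
      rw [hB]
      have : ((none : Option String), (none : Option String)) = pvG [] := by simp [pvG]
      rw [this, pvPairStep_g]
      simp
    rw [this, hA]
    simp [pvF]

theorem pv_nodup_step (dA : PySem.Dict String (List String)) (p : String × String)
    (h : dA.keys.Nodup) : (pvGroupStep dA p).keys.Nodup := by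
  have := PySem.Dict.nodup_keys_foldl_modify_key [p] (fun q : String × String => q.1) []
    (fun _ q ls => ls ++ [q.2]) dA h
  simpa [List.foldl, pvGroupStep] using this

theorem pv_fold_inv (changes : List (String × String))
    (dA : PySem.Dict String (List String))
    (dB : PySem.Dict String (Option String × Option String))
    (hnd : dA.keys.Nodup) (h : dB.items = dA.items.map pvF) :
    (changes.foldl pvFirstStep dB).items = (changes.foldl pvGroupStep dA).items.map pvF := by
  induction changes generalizing dA dB with
  | nil => simpa using h
  | cons c cs ih =>
      simp only [List.foldl_cons]
      exact ih _ _ (pv_nodup_step dA c hnd) (pv_step_inv dA dB c hnd h)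

theorem pvEmit_agree (recs : List (List (String × String))) (p : String × List String) :
    pvEmitB recs (pvF p) = pvEmitA recs p := by
  unfold pvEmitA pvEmitB pvF pvG
  cases hp : ((p.2.filter (fun l => PySem.Str.startswith l "+")).map pvProc) with
  | nil =>
      cases hm : ((p.2.filter (fun l => PySem.Str.startswith l "-")).map pvProc) with
      | nil => simp
      | cons m ms => simp [PySem.List.pyGetD_zero]
  | cons q qs =>
      cases hm : ((p.2.filter (fun l => PySem.Str.startswith l "-")).map pvProc) with
      | nil => simp [PySem.List.pyGetD_zero]
      | cons m ms => simp [PySem.List.pyGetD_zero]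

-- ===== VERDICT (by name: the statement is the Claim_ definition above) =====
theorem compress_changes_spec : Claim_equal_compress_changes := by
  intro changes _
  unfold Spec_compress_changes compress_changes compress_changes_alt
  have hinv := pv_fold_inv changes PySem.Dict.empty PySem.Dict.empty (by simp [PySem.Dict.keys, show (PySem.Dict.empty : PySem.Dict String (List String)).items = [] from rfl]) (by rfl)
  rw [hinv, List.foldl_map]
  have hf : (fun acc q => pvEmitB acc (pvF q)) = pvEmitA := by
    funext acc q
    exact pvEmit_agree acc q
  rw [hf]
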